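-- pv_equiv track=rewrite | github.com/yeongseon/excel-dbapi | src/excel_dbapi/parser/tokenizer.py | _split_csv_preserve_empty
-- ===== SOURCE A (Python) =====
-- from typing import Any, List
--
-- def _split_csv_preserve_empty(text: str) -> List[str]:
--     items: List[str] = []
--     current: List[str] = []
--     in_single = False
--     in_double = False
--     paren_depth = 0
--     case_depth = 0
--     index = 0
--
--     while index < len(text):
--         char = text[index]
--
--         if in_single:
--             current.append(char)
--             if char == "'":
--                 if index + 1 < len(text) and text[index + 1] == "'":
--                     current.append(text[index + 1])
--                     index += 1
--                 else:
--                     in_single = False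
--             index += 1
--             continue
--
--         if in_double:
--             current.append(char)
--             if char == '"':
--                 if index + 1 < len(text) and text[index + 1] == '"':
--                     current.append(text[index + 1])
--                     index += 1
--                 else:
--                     in_double = False
--             index += 1
--             continue
--
--         if char == "'":
--             in_single = True
--             current.append(char)
--             index += 1
--             continue
--
--         if char == '"':
--             in_double = True
--             current.append(char)
--             index += 1
--             continue
--
--         if char == "(":
--             paren_depth += 1
--             current.append(char)
--             index += 1
--             continue
--
--         if char == ")":
--             if paren_depth > 0:
--                 paren_depth -= 1
--             current.append(char)
--             index += 1
--             continue
--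
--         if char.isalpha() or char == "_":
--             start = index
--             while index < len(text) and (text[index].isalnum() or text[index] == "_"):
--                 index += 1
--             word = text[start:index]
--             upper = word.upper()
--             if upper == "CASE":
--                 case_depth += 1
--             elif upper == "END" and case_depth > 0:
--                 case_depth -= 1
--             current.append(word)
--             continue
--
--         if char == "," and paren_depth == 0 and case_depth == 0:
--             items.append("".join(current).strip())
--             current = []
--             index += 1
--             continue
--
--         current.append(char)
--         index += 1
--
--     items.append("".join(current).strip())
--     return items
-- ===== SOURCE B (Python) =====
-- from typing import Any, List
--
--
-- def _tokenize(text):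
--     # One pass producing tokens: quoted strings (with '' / "" escapes, possibly
--     # unterminated), identifiers, and single characters.
--     tokens = []
--     i = 0
--     n = len(text)
--     while i < n:
--         c = text[i]
--         if c == "'" or c == '"':
--             j = i + 1
--             while j < n:
--                 if text[j] == c:
--                     if j + 1 < n and text[j + 1] == c:
--                         j += 2
--                     else:
--                         j += 1
--                         break
--                 else:
--                     j += 1
--             tokens.append(text[i:j])
--             i = j
--         elif c.isalpha() or c == "_":
--             j = i + 1
--             while j < n and (text[j].isalnum() or text[j] == "_"):
--                 j += 1
--             tokens.append(text[i:j])
--             i = j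
--         else:
--             tokens.append(c)
--             i += 1
--     return tokens
--
--
-- def _split_csv_preserve_empty(text: str) -> List[str]:
--     items: List[str] = []
--     buf: List[str] = []
--     paren_depth = 0
--     case_depth = 0
--     for tok in _tokenize(text):
--         if tok == "(":
--             paren_depth += 1
--         elif tok == ")":
--             if paren_depth > 0:
--                 paren_depth -= 1
--         elif tok == "," and paren_depth == 0 and case_depth == 0:
--             items.append("".join(buf).strip())
--             buf = []
--             continue
--         elif tok[0].isalpha() or tok[0] == "_":
--             u = tok.upper()
--             if u == "CASE":
--                 case_depth += 1
--             elif u == "END" and case_depth > 0: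
--                 case_depth -= 1
--         buf.append(tok)
--     items.append("".join(buf).strip())
--     return items
-- ===== Notes on version B (the rewrite author's own statement) =====
-- stated objective: alternative
-- what changed: Replaced A's single interleaved state machine (index loop carrying in_single/in_double flags mixed with depth counting and buffering) by a two-phase design: a tokenizer that first cuts the text into quoted strings, identifiers and single characters, then a simple fold over tokens maintaining only paren/CASE depth and emitting fields on top-level commas.
import Mathlib
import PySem

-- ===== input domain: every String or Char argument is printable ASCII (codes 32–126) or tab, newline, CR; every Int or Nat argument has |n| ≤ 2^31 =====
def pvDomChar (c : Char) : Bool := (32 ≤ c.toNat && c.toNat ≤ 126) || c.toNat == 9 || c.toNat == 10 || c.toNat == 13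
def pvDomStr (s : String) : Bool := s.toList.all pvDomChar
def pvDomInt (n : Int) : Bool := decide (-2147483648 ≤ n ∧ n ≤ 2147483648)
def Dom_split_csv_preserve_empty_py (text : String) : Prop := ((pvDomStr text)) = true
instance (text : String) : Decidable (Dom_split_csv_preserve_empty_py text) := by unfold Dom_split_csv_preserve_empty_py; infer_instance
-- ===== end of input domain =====

-- B restructures A's single interleaved state machine into tokenize-then-fold; alternative decomposition, same cost.

-- ===== PORT A =====
-- A's word character test: text[index].isalnum() or text[index] == "_"
def pvWordCharA (c : Char) : Bool := PySem.Chars.isalnum c || c = '_'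

-- The while loop of A, one step per iteration of the Python loop; 'current' holds the
-- concatenation of the pieces Python appends (joined only at emission, as "".join does).
def pvLoopA : List Char → List String → List Char → Bool → Bool → Nat → Nat → List String
  | [], items, current, _, _, _, _ => items ++ [String.ofList (PySem.Chars.strip current)]
  | c :: rest, items, current, in_single, in_double, paren, cdep =>
    if in_single then
      -- in_single: append char; on ' check whether the NEXT char doubles it, else close
      if c = '\'' then
        match rest with
        | c2 :: rest2 =>
          if c2 = '\'' then pvLoopA rest2 items (current ++ [c, c2]) true in_double paren cdep
          else pvLoopA (c2 :: rest2) items (current ++ [c]) false in_double paren cdep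
        | [] => pvLoopA [] items (current ++ [c]) false in_double paren cdep
      else pvLoopA rest items (current ++ [c]) true in_double paren cdep
    else if in_double then
      if c = '"' then
        match rest with
        | c2 :: rest2 =>
          if c2 = '"' then pvLoopA rest2 items (current ++ [c, c2]) in_single true paren cdep
          else pvLoopA (c2 :: rest2) items (current ++ [c]) in_single false paren cdep
        | [] => pvLoopA [] items (current ++ [c]) in_single false paren cdep
      else pvLoopA rest items (current ++ [c]) in_single true paren cdep
    else if c = '\'' then pvLoopA rest items (current ++ [c]) true in_double paren cdep
    else if c = '"' then pvLoopA rest items (current ++ [c]) in_single true paren cdep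
    else if c = '(' then pvLoopA rest items (current ++ [c]) in_single in_double (paren + 1) cdep
    else if c = ')' then
      pvLoopA rest items (current ++ [c]) in_single in_double (if paren > 0 then paren - 1 else paren) cdep
    else if PySem.Chars.isalpha c || c = '_' then
      -- inner word while-loop: the first char passes the (isalnum or '_') test, so the
      -- scan from 'index' takes c and then the longest run of word chars in rest
      let word := c :: rest.takeWhile pvWordCharA
      let upper := word.map PySem.Chars.upperChar
      let cdep' := if upper = ['C','A','S','E'] then cdep + 1
                   else if upper = ['E','N','D'] ∧ cdep > 0 then cdep - 1
                   else cdep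
      pvLoopA (rest.dropWhile pvWordCharA) items (current ++ word) in_single in_double paren cdep'
    else if c = ',' ∧ paren = 0 ∧ cdep = 0 then
      pvLoopA rest (items ++ [String.ofList (PySem.Chars.strip current)]) [] in_single in_double paren cdep
    else pvLoopA rest items (current ++ [c]) in_single in_double paren cdep
  termination_by cs => cs.length
  decreasing_by
    all_goals simp_all
    all_goals (have h1 := List.length_dropWhile_le (p := pvWordCharA) (l := rest); omega)

def split_csv_preserve_empty_py (text : String) : List String :=
  pvLoopA text.toList [] [] false false 0 0

-- ===== PORT B =====
-- B's tokenizer quote scanner (the inner while loop of _tokenize): chars after an opening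
-- quote q up to and including the matching close (doubled qq kept), or all of them if
-- unterminated; returns (token tail, rest of the input).
def pvQuoteB (q : Char) : List Char → List Char × List Char
  | [] => ([], [])
  | c :: rest =>
    if c = q then
      match rest with
      | c2 :: rest2 =>
        if c2 = q then (c :: c2 :: (pvQuoteB q rest2).1, (pvQuoteB q rest2).2)
        else ([c], rest)
      | [] => ([c], [])
    else (c :: (pvQuoteB q rest).1, (pvQuoteB q rest).2)
  termination_by cs => cs.length
  decreasing_by all_goals (simp_all; try omega)

theorem pvQuoteB_rest_le (q : Char) (cs : List Char) : (pvQuoteB q cs).2.length ≤ cs.length := by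
  induction cs using pvQuoteB.induct q with
  | case1 => simp [pvQuoteB]
  | case2 rest2 ih => rw [pvQuoteB.eq_def]; simp; omega
  | case3 c2 rest2 h2 => rw [pvQuoteB.eq_def]; simp [h2]
  | case4 => rw [pvQuoteB.eq_def]; simp
  | case5 c rest h ih => rw [pvQuoteB.eq_def]; simp [h]; omega

-- B's identifier-character test (the [A-Za-z0-9_] continuation set)
def pvWordCharB (c : Char) : Bool := PySem.Chars.isalnum c || c = '_'

-- phase 1 of B: cut the text into tokens
def pvTokenizeB : List Char → List (List Char)
  | [] => []
  | c :: rest =>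
    if c = '\'' ∨ c = '"' then
      (c :: (pvQuoteB c rest).1) :: pvTokenizeB (pvQuoteB c rest).2
    else if PySem.Chars.isalpha c || c = '_' then
      (c :: rest.takeWhile pvWordCharB) :: pvTokenizeB (rest.dropWhile pvWordCharB)
    else [c] :: pvTokenizeB rest
  termination_by cs => cs.length
  decreasing_by
    all_goals simp_all
    · have := pvQuoteB_rest_le c rest; omega
    · have := List.length_dropWhile_le (p := pvWordCharB) (l := rest); omega

-- phase 2 of B: fold over tokens; only paren/CASE depth and the field buffer remain
def pvProcB : List (List Char) → List String → List Char → Nat → Nat → List String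
  | [], items, buf, _, _ => items ++ [String.ofList (PySem.Chars.strip buf)]
  | t :: ts, items, buf, paren, cdep =>
    if t = ['('] then pvProcB ts items (buf ++ t) (paren + 1) cdep
    else if t = [')'] then
      pvProcB ts items (buf ++ t) (if paren > 0 then paren - 1 else paren) cdep
    else if t = [','] ∧ paren = 0 ∧ cdep = 0 then
      pvProcB ts (items ++ [String.ofList (PySem.Chars.strip buf)]) [] paren cdep
    else if PySem.Chars.isalpha (t.headD ' ') || t.headD ' ' = '_' then
      let u := t.map PySem.Chars.upperChar
      if u = ['C','A','S','E'] then pvProcB ts items (buf ++ t) paren (cdep + 1)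
      else if u = ['E','N','D'] ∧ cdep > 0 then pvProcB ts items (buf ++ t) paren (cdep - 1)
      else pvProcB ts items (buf ++ t) paren cdep
    else pvProcB ts items (buf ++ t) paren cdep

def split_csv_preserve_empty_py_alt (text : String) : List String :=
  pvProcB (pvTokenizeB text.toList) [] [] 0 0

-- ===== PRECONDITION & SPEC =====
def Spec_split_csv_preserve_empty_py (text : String) (out : List String) : Prop := out = split_csv_preserve_empty_py_alt text
instance (text : String) (out : List String) : Decidable (Spec_split_csv_preserve_empty_py text out) := by unfold Spec_split_csv_preserve_empty_py; infer_instance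

-- ===== CLAIM (what is proved, stated in full; the proofs are below) =====
def Claim_equal_split_csv_preserve_empty_py : Prop := ∀ (text : String), Dom_split_csv_preserve_empty_py text → Spec_split_csv_preserve_empty_py text (split_csv_preserve_empty_py text)

-- ===== LEMMAS AND PROOFS =====

theorem pv_squote_run (cs : List Char) : ∀ items current paren cdep,
    pvLoopA cs items current true false paren cdep
      = pvLoopA (pvQuoteB '\'' cs).2 items (current ++ (pvQuoteB '\'' cs).1) false false paren cdep := by
  induction cs using pvQuoteB.induct '\'' with
  | case1 => intro items current paren cdep; rw [pvQuoteB.eq_def]; simp [pvLoopA]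
  | case2 rest2 ih =>
      intro items current paren cdep
      rw [pvLoopA.eq_def, pvQuoteB.eq_def]
      simp [ih]
  | case3 c2 rest2 h2 =>
      intro items current paren cdep
      rw [pvLoopA.eq_def, pvQuoteB.eq_def]
      simp [h2]
  | case4 =>
      intro items current paren cdep
      rw [pvLoopA.eq_def, pvQuoteB.eq_def]
      simp
  | case5 c rest h ih =>
      intro items current paren cdep
      rw [pvLoopA.eq_def, pvQuoteB.eq_def]
      simp [h, ih]

theorem pv_dquote_run (cs : List Char) : ∀ items current paren cdep,
    pvLoopA cs items current false true paren cdep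
      = pvLoopA (pvQuoteB '"' cs).2 items (current ++ (pvQuoteB '"' cs).1) false false paren cdep := by
  induction cs using pvQuoteB.induct '"' with
  | case1 => intro items current paren cdep; rw [pvQuoteB.eq_def]; simp [pvLoopA]
  | case2 rest2 ih =>
      intro items current paren cdep
      rw [pvLoopA.eq_def, pvQuoteB.eq_def]
      simp [ih]
  | case3 c2 rest2 h2 =>
      intro items current paren cdep
      rw [pvLoopA.eq_def, pvQuoteB.eq_def]
      simp [h2]
  | case4 =>
      intro items current paren cdep
      rw [pvLoopA.eq_def, pvQuoteB.eq_def]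
      simp
  | case5 c rest h ih =>
      intro items current paren cdep
      rw [pvLoopA.eq_def, pvQuoteB.eq_def]
      simp [h, ih]

theorem pv_main (cs : List Char) : ∀ items current paren cdep,
    pvLoopA cs items current false false paren cdep
      = pvProcB (pvTokenizeB cs) items current paren cdep := by
  induction cs using pvTokenizeB.induct with
  | case1 => intro items current paren cdep; simp [pvLoopA, pvTokenizeB, pvProcB]
  | case2 c rest hq ih =>
      intro items current paren cdep
      rw [pvLoopA.eq_def, pvTokenizeB.eq_def]
      rcases hq with rfl | rfl
      · simp only [reduceIte]
        rw [pv_squote_run, ih]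
        conv_rhs => rw [pvProcB.eq_def]
        simp [PySem.Chars.isalpha]
        intro h; exact absurd h (by decide)
      · simp only [reduceIte]
        rw [pv_dquote_run, ih]
        conv_rhs => rw [pvProcB.eq_def]
        simp [PySem.Chars.isalpha]
        intro h; exact absurd h (by decide)
  | case3 c rest hq ha ih =>
      intro items current paren cdep
      obtain ⟨hq1, hq2⟩ := not_or.mp hq
      have hc1 : ¬ c = '(' := by rintro rfl; revert ha; decide
      have hc2 : ¬ c = ')' := by rintro rfl; revert ha; decide
      have hc3 : ¬ c = ',' := by rintro rfl; revert ha; decide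
      rw [pvLoopA.eq_def, pvTokenizeB.eq_def]
      conv_rhs => rw [pvProcB.eq_def]
      simp only [show pvWordCharA = pvWordCharB from rfl]
      simp [hq1, hq2, hc1, hc2, hc3, ha]
      split_ifs <;> simp [ih]
  | case4 c rest hq ha ih =>
      intro items current paren cdep
      obtain ⟨hq1, hq2⟩ := not_or.mp hq
      rw [pvLoopA.eq_def, pvTokenizeB.eq_def]
      conv_rhs => rw [pvProcB.eq_def]
      by_cases hc1 : c = '('
      · subst hc1; simp [ih, show PySem.Chars.isalpha '(' = false from by decide]
      · by_cases hc2 : c = ')'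
        · subst hc2; simp [ih, show PySem.Chars.isalpha ')' = false from by decide]
        · by_cases hc3 : c = ','
          · subst hc3
            simp [ih, show PySem.Chars.isalpha ',' = false from by decide]
          · simp [hq1, hq2, hc1, hc2, hc3, ha, ih]

-- ===== VERDICT (by name: the statement is the Claim_ definition above) =====
theorem split_csv_preserve_empty_py_spec : Claim_equal_split_csv_preserve_empty_py := by
  intro text _
  unfold Spec_split_csv_preserve_empty_py split_csv_preserve_empty_py split_csv_preserve_empty_py_alt
  exact pv_main text.toList [] [] 0 0
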